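-- pv_equiv track=rewrite | github.com/liuyibo-leo/Data_Structures_and_Algorithms | Chapter 11/OJ Test/钥匙和房间.py | canVisitAll
-- ===== SOURCE A (Python) =====
-- def canVisitAll(rooms):
--     room_map = {0}
--     def enterroom(keys):
--         for key in keys:
--             if key not in room_map:
--                 room_map.add(key)
--                 enterroom(rooms[key])
--             else:
--                 pass
--         return
--     enterroom(rooms[0])
--     return len(room_map)==len(rooms)
-- ===== SOURCE B (Python) =====
-- def canVisitAll(rooms):
--     visited = {0}
--     stack = list(rooms[0])
--     while stack:
--         key = stack.pop()
--         if key not in visited: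
--             visited.add(key)
--             stack.extend(rooms[key])
--     return len(visited) == len(rooms)
-- ===== Notes on version B (the rewrite author's own statement) =====
-- stated objective: idiomatic
-- what changed: The recursive DFS with a nested helper mutating a closure variable is replaced by an iterative worklist loop with an explicit stack (visited={0}, stack=list(rooms[0]), pop/extend), avoiding Python recursion and its depth limit while computing the same reachable set.
import Mathlib
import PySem

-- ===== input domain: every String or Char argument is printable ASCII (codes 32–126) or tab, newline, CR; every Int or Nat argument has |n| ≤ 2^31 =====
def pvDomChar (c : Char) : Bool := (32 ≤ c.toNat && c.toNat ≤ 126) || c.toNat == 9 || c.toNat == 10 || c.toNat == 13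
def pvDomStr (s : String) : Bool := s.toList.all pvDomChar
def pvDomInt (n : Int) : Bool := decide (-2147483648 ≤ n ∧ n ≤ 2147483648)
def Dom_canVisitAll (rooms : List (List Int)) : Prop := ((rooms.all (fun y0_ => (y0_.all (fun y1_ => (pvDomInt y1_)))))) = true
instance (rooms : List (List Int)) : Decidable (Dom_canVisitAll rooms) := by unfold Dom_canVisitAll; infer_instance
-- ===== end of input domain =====

-- B rewrites A's recursive closure-mutating DFS as an iterative explicit-stack loop; same reachable
-- set, same return value on the stated domain (objective: idiomatic, no speed claim).

-- ===== PORT A =====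
-- rooms[key] lookup shared by both ports (pyGet? is exact, including negative indices); the
-- '.getD []' default is only reached outside Pre_canVisitAll, where the Python raises IndexError.
def pvRoom (rooms : List (List Int)) (k : Int) : List Int :=
  (PySem.List.pyGet? rooms k).getD []

-- 'def enterroom(keys)' of A: for key in keys: if key not in room_map: add; recurse on rooms[key].
-- fuel = extra totality guard; inside Pre_canVisitAll it is proved never to run out.
def enterroom (rooms : List (List Int)) : Nat → List Int → PySem.Set Int → PySem.Set Int
  | _, [], vis => vis
  | 0, _ :: _, vis => vis
  | fuel + 1, key :: ks, vis =>
      if PySem.Set.contains vis key then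
        enterroom rooms (fuel + 1) ks vis
      else
        enterroom rooms (fuel + 1) ks
          (enterroom rooms fuel (pvRoom rooms key) (PySem.Set.add vis key))
termination_by fuel ks _ => (fuel, ks.length)

def canVisitAll (rooms : List (List Int)) : Bool :=
  let roomMap := enterroom rooms (rooms.flatten.length + 1) (pvRoom rooms 0) (PySem.Set.ofList [0])
  roomMap.length == rooms.length

-- ===== PORT B =====
-- while stack: key = stack.pop(); if key not in visited: visited.add(key); stack.extend(rooms[key]).
-- Stack kept with its top at the END (Python pop()/extend); fuel is a totality guard only.
def pvStackLoop (rooms : List (List Int)) : Nat → List Int → PySem.Set Int → PySem.Set Int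
  | 0, _, vis => vis
  | _ + 1, [], vis => vis
  | fuel + 1, s :: st, vis =>
      -- key = stack.pop(): key is the last element, stack' what is left
      if PySem.Set.contains vis ((s :: st).getLast (by simp)) then
        pvStackLoop rooms fuel ((s :: st).dropLast) vis
      else
        pvStackLoop rooms fuel
          ((s :: st).dropLast ++ pvRoom rooms ((s :: st).getLast (by simp)))
          (PySem.Set.add vis ((s :: st).getLast (by simp)))

def canVisitAll_alt (rooms : List (List Int)) : Bool :=
  let maxLen := (rooms.map List.length).foldr Nat.max 0
  let visited := pvStackLoop rooms ((rooms.flatten.length + 2) * maxLen + 1)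
      (pvRoom rooms 0) (PySem.Set.ofList [0])
  visited.length == rooms.length

-- ===== PRECONDITION & SPEC =====
-- pvReachSet rooms = the set of keys reachable from room 0 (saturation of one-step key
-- successors; rooms.flatten.length + 1 rounds always reach the fixpoint); used only by Pre_.
def pvReachSet (rooms : List (List Int)) : PySem.Set Int :=
  (List.range (rooms.flatten.length + 1)).foldl
    (fun S _ => PySem.Set.update S (S.flatMap (fun k => (PySem.List.pyGet? rooms k).getD [])))
    (PySem.Set.ofList [0])

-- Pre_ excludes exactly the inputs on which both programs raise IndexError: empty rooms
-- (rooms[0] fails, note 0 ∈ pvReachSet forces len(rooms) ≥ 1) and inputs where some key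
-- reachable from room 0 lies outside [-len(rooms), len(rooms)) (the raise happens when that
-- key is reached; an out-of-range key in an unreachable room is harmless and stays admitted).
def Pre_canVisitAll (rooms : List (List Int)) : Prop :=
  ∀ k ∈ pvReachSet rooms, -(rooms.length : Int) ≤ k ∧ k < (rooms.length : Int)
instance (rooms : List (List Int)) : Decidable (Pre_canVisitAll rooms) := by
  unfold Pre_canVisitAll; infer_instance

def pvWitness_canVisitAll : List (List Int) := [[1, 2], [0], []]

def Spec_canVisitAll (rooms : List (List Int)) (out : Bool) : Prop := out = canVisitAll_alt rooms
instance (rooms : List (List Int)) (out : Bool) : Decidable (Spec_canVisitAll rooms out) := by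
  unfold Spec_canVisitAll; infer_instance

-- ===== CLAIM (what is proved, stated in full; the proofs are below) =====
def Claim_equal_canVisitAll : Prop := ∀ (rooms : List (List Int)), Dom_canVisitAll rooms → Pre_canVisitAll rooms → Spec_canVisitAll rooms (canVisitAll rooms)

-- ===== LEMMAS AND PROOFS =====

-- reachability by keys from room 0
inductive pvReach (rooms : List (List Int)) : Int → Prop
  | zero : pvReach rooms 0
  | step {x y : Int} : pvReach rooms x → y ∈ pvRoom rooms x → pvReach rooms y

-- finite universe every visited set lives in
def pvU (rooms : List (List Int)) : Finset Int := insert 0 rooms.flatten.toFinset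

lemma pvRoom_sub_flatten (rooms : List (List Int)) (k : Int) :
    ∀ y ∈ pvRoom rooms k, y ∈ rooms.flatten := by
  intro y hy
  rw [pvRoom] at hy
  cases hg : PySem.List.pyGet? rooms k with
  | none => rw [hg] at hy; cases hy
  | some r =>
    rw [hg] at hy
    exact List.mem_flatten.mpr ⟨r, PySem.List.mem_of_pyGet?_eq_some rooms hg, hy⟩

lemma pvU_card_le (rooms : List (List Int)) :
    (pvU rooms).card ≤ rooms.flatten.length + 1 := by
  calc (pvU rooms).card ≤ rooms.flatten.toFinset.card + 1 := Finset.card_insert_le _ _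
    _ ≤ rooms.flatten.length + 1 := by
        have := rooms.flatten.toFinset_card_le
        omega

lemma pvFlatten_sub_U (rooms : List (List Int)) {k : Int} (h : k ∈ rooms.flatten) :
    k ∈ pvU rooms := by
  simp [pvU, List.mem_toFinset, h]

-- ---- port A : characterisation ----

lemma enterroom_main (rooms : List (List Int)) :
    ∀ (f : Nat) (ks : List Int) (vis : PySem.Set Int),
      (∀ k ∈ ks, k ∈ rooms.flatten) →
      (∀ x ∈ vis, x ∈ pvU rooms) →
      ((pvU rooms \ vis.toFinset).card ≤ f) →
      (∀ x ∈ vis, x ∈ enterroom rooms f ks vis) ∧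
      (∀ k ∈ ks, k ∈ enterroom rooms f ks vis) ∧
      (∀ x ∈ enterroom rooms f ks vis, x ∈ pvU rooms) ∧
      (∀ x ∈ enterroom rooms f ks vis, x ∉ vis →
        ∀ y ∈ pvRoom rooms x, y ∈ enterroom rooms f ks vis) := by
  intro f
  induction f with
  | zero =>
    intro ks vis hflat hvU hfuel
    have hempty : pvU rooms \ vis.toFinset = ∅ := Finset.card_eq_zero.mp (Nat.le_zero.mp hfuel)
    have hUV : ∀ x ∈ pvU rooms, x ∈ vis := by
      intro x hx
      by_contra hxv
      have hmem : x ∈ pvU rooms \ vis.toFinset :=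
        Finset.mem_sdiff.mpr ⟨hx, fun h => hxv (List.mem_toFinset.mp h)⟩
      rw [hempty] at hmem
      exact absurd hmem (Finset.notMem_empty x)
    have hR : enterroom rooms 0 ks vis = vis := by cases ks <;> simp [enterroom]
    rw [hR]
    exact ⟨fun x hx => hx, fun k hk => hUV k (pvFlatten_sub_U rooms (hflat k hk)), hvU,
      fun x hx hxv => absurd hx hxv⟩
  | succ f ihf =>
    intro ks
    induction ks with
    | nil =>
      intro vis hflat hvU hfuel
      simp only [enterroom]
      exact ⟨fun x hx => hx, by simp, hvU, fun x hx hxv => absurd hx hxv⟩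
    | cons key ks ihk =>
      intro vis hflat hvU hfuel
      have hkeyflat : key ∈ rooms.flatten := hflat key List.mem_cons_self
      have hkeyU : key ∈ pvU rooms := pvFlatten_sub_U rooms hkeyflat
      simp only [enterroom]
      split
      next h =>
        have hkv : key ∈ vis := (PySem.Set.contains_iff vis key).mp h
        obtain ⟨O1, O2, O3, O4⟩ := ihk vis (fun k hk => hflat k (List.mem_cons_of_mem _ hk)) hvU hfuel
        refine ⟨O1, ?_, O3, O4⟩
        intro k hk
        rcases List.mem_cons.mp hk with rfl | hk
        · exact O1 _ hkv
        · exact O2 _ hk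
      next h =>
        have hkv : key ∉ vis := fun hm => h ((PySem.Set.contains_iff vis key).mpr hm)
        have hfin : (PySem.Set.add vis key).toFinset = insert key vis.toFinset := by
          rw [PySem.Set.add_of_not_mem hkv]
          simp [List.toFinset_append, Finset.union_singleton]
        have hkeyd : key ∈ pvU rooms \ vis.toFinset :=
          Finset.mem_sdiff.mpr ⟨hkeyU, fun hc => hkv (List.mem_toFinset.mp hc)⟩
        have hcard : (pvU rooms \ (PySem.Set.add vis key).toFinset).card ≤ f := by
          rw [hfin, Finset.sdiff_insert]
          have := Finset.card_erase_of_mem hkeyd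
          omega
        obtain ⟨I1, I2, I3, I4⟩ := ihf (pvRoom rooms key) (PySem.Set.add vis key)
          (pvRoom_sub_flatten rooms key)
          (fun x hx => by
            rcases (PySem.Set.mem_add _ _ _).mp hx with hx | rfl
            exacts [hvU x hx, hkeyU])
          hcard
        set vis₂ := enterroom rooms f (pvRoom rooms key) (PySem.Set.add vis key) with hvis₂
        have hsub2 : vis.toFinset ⊆ vis₂.toFinset := by
          intro x hx
          exact List.mem_toFinset.mpr
            (I1 x ((PySem.Set.mem_add _ _ _).mpr (Or.inl (List.mem_toFinset.mp hx))))
        have hcard2 : (pvU rooms \ vis₂.toFinset).card ≤ f + 1 := by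
          have := Finset.card_le_card (Finset.sdiff_subset_sdiff (Finset.Subset.refl (pvU rooms)) hsub2)
          omega
        obtain ⟨O1, O2, O3, O4⟩ := ihk vis₂ (fun k hk => hflat k (List.mem_cons_of_mem _ hk)) I3 hcard2
        refine ⟨?_, ?_, O3, ?_⟩
        · exact fun x hx => O1 x (I1 x ((PySem.Set.mem_add _ _ _).mpr (Or.inl hx)))
        · intro k hk
          rcases List.mem_cons.mp hk with rfl | hk
          · exact O1 _ (I1 _ ((PySem.Set.mem_add _ _ _).mpr (Or.inr rfl)))
          · exact O2 _ hk
        · intro x hx hxv y hy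
          by_cases hx2 : x ∈ vis₂
          · by_cases hxk : x = key
            · subst hxk
              exact O1 _ (I2 y hy)
            · have hxadd : x ∉ PySem.Set.add vis key := fun hm => by
                rcases (PySem.Set.mem_add _ _ _).mp hm with hm | hm
                exacts [hxv hm, hxk hm]
              exact O1 _ (I4 x hx2 hxadd y hy)
          · exact O4 x hx hx2 y hy

lemma enterroom_sound (rooms : List (List Int)) :
    ∀ (f : Nat) (ks : List Int) (vis : PySem.Set Int),
      (∀ x ∈ vis, pvReach rooms x) → (∀ k ∈ ks, pvReach rooms k) →
      ∀ x ∈ enterroom rooms f ks vis, pvReach rooms x := by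
  intro f
  induction f with
  | zero =>
    intro ks vis hv hk x hx
    cases ks <;> · simp only [enterroom] at hx; exact hv x hx
  | succ f ihf =>
    intro ks
    induction ks with
    | nil =>
      intro vis hv hk x hx
      simp only [enterroom] at hx; exact hv x hx
    | cons key ks ihk =>
      intro vis hv hk x hx
      simp only [enterroom] at hx
      split at hx
      · exact ihk vis hv (fun k h => hk k (List.mem_cons_of_mem _ h)) x hx
      · have hkey : pvReach rooms key := hk key List.mem_cons_self
        refine ihk _ ?_ (fun k h => hk k (List.mem_cons_of_mem _ h)) x hx
        intro z hz
        exact ihf _ _ (fun w hw => by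
            rcases (PySem.Set.mem_add _ _ _).mp hw with hw | rfl
            · exact hv w hw
            · exact hkey)
          (fun w hw => pvReach.step hkey hw) z hz

lemma enterroom_nodup (rooms : List (List Int)) :
    ∀ (f : Nat) (ks : List Int) (vis : PySem.Set Int),
      vis.Nodup → (enterroom rooms f ks vis).Nodup := by
  intro f
  induction f with
  | zero => intro ks vis h; cases ks <;> simpa [enterroom]
  | succ f ihf =>
    intro ks
    induction ks with
    | nil => intro vis h; simpa [enterroom]
    | cons key ks ihk =>
      intro vis h
      simp only [enterroom]
      split
      · exact ihk vis h
      · exact ihk _ (ihf _ _ (PySem.Set.nodup_add _ _ h))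

lemma memA_iff (rooms : List (List Int)) (x : Int) :
    x ∈ enterroom rooms (rooms.flatten.length + 1) (pvRoom rooms 0) (PySem.Set.ofList [0]) ↔
      pvReach rooms x := by
  have h0U : (0 : Int) ∈ pvU rooms := Finset.mem_insert_self _ _
  have hmem0 : ∀ w : Int, w ∈ (PySem.Set.ofList [(0 : Int)]) ↔ w = 0 := by
    intro w
    rw [PySem.Set.mem_ofList]
    simp
  have hks : ∀ k ∈ pvRoom rooms 0, k ∈ rooms.flatten :=
    pvRoom_sub_flatten rooms 0
  have hvU : ∀ w ∈ (PySem.Set.ofList [(0 : Int)]), w ∈ pvU rooms := by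
    intro w hw
    rw [(hmem0 w).mp hw]
    exact h0U
  have hfuel : (pvU rooms \ (PySem.Set.ofList [(0 : Int)]).toFinset).card ≤
      rooms.flatten.length + 1 := by
    have hU := pvU_card_le rooms
    have := Finset.card_le_card (Finset.sdiff_subset (s := pvU rooms)
      (t := (PySem.Set.ofList [(0 : Int)]).toFinset))
    omega
  obtain ⟨M1, M2, M3, M4⟩ :=
    enterroom_main rooms (rooms.flatten.length + 1) (pvRoom rooms 0) (PySem.Set.ofList [0]) hks hvU hfuel
  constructor
  · intro hx
    refine enterroom_sound rooms _ _ _ ?_ (fun k hk => pvReach.step pvReach.zero hk) x hx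
    intro w hw
    rw [(hmem0 w).mp hw]
    exact pvReach.zero
  · intro hr
    induction hr with
    | zero => exact M1 0 ((hmem0 0).mpr rfl)
    | @step a b h1 h2 ih =>
      by_cases ha : a = 0
      · subst ha
        exact M2 _ h2
      · exact M4 a ih (fun hm => ha ((hmem0 a).mp hm)) b h2

-- ---- port B : characterisation ----

lemma pvLe_foldr_max {a : Nat} {l : List Nat} (h : a ∈ l) : a ≤ l.foldr Nat.max 0 := by
  induction l with
  | nil => cases h
  | cons b l ih =>
    rcases List.mem_cons.mp h with rfl | h
    · exact le_trans (Nat.le_max_left _ _) (le_refl _)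
    · exact le_trans (ih h) (Nat.le_max_right _ _)

lemma stackLoop_main (rooms : List (List Int)) :
    ∀ (f : Nat) (st : List Int) (vis : PySem.Set Int),
      (∀ k ∈ st, k ∈ rooms.flatten) →
      (∀ x ∈ vis, x ∈ pvU rooms) →
      (st.length + ∑ x ∈ pvU rooms \ vis.toFinset, (pvRoom rooms x).length ≤ f) →
      (∀ x ∈ vis, x ∈ pvStackLoop rooms f st vis) ∧
      (∀ k ∈ st, k ∈ pvStackLoop rooms f st vis) ∧
      (∀ x ∈ pvStackLoop rooms f st vis, x ∈ pvU rooms) ∧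
      (∀ x ∈ pvStackLoop rooms f st vis, x ∉ vis →
        ∀ y ∈ pvRoom rooms x, y ∈ pvStackLoop rooms f st vis) := by
  intro f
  induction f with
  | zero =>
    intro st vis hst hvU hfuel
    have hst0 : st = [] := List.length_eq_zero_iff.mp (by omega)
    subst hst0
    simp only [pvStackLoop]
    exact ⟨fun x hx => hx, by simp, hvU, fun x hx hxv => absurd hx hxv⟩
  | succ f ih =>
    intro st vis hst hvU hfuel
    cases st with
    | nil =>
      simp only [pvStackLoop]
      exact ⟨fun x hx => hx, by simp, hvU, fun x hx hxv => absurd hx hxv⟩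
    | cons s st' =>
      simp only [pvStackLoop]
      have hdecomp : (s :: st').dropLast ++ [(s :: st').getLast (by simp)] = s :: st' :=
        List.dropLast_append_getLast (by simp)
      have hkeymem : (s :: st').getLast (by simp) ∈ s :: st' := List.getLast_mem _
      have hkeyflat : (s :: st').getLast (by simp) ∈ rooms.flatten := hst _ hkeymem
      have hkeyU := pvFlatten_sub_U rooms hkeyflat
      have hstsub : ∀ k ∈ (s :: st').dropLast, k ∈ rooms.flatten :=
        fun k hk => hst k (List.dropLast_subset _ hk)
      have hlen : (s :: st').dropLast.length + 1 = (s :: st').length := by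
        conv_rhs => rw [← hdecomp]
        simp
      split
      next h =>
        have hkv : (s :: st').getLast (by simp) ∈ vis := (PySem.Set.contains_iff vis _).mp h
        obtain ⟨O1, O2, O3, O4⟩ := ih (s :: st').dropLast vis hstsub hvU (by omega)
        refine ⟨O1, ?_, O3, O4⟩
        intro k hk
        rw [← hdecomp] at hk
        rcases List.mem_append.mp hk with hk | hk
        · exact O2 k hk
        · simp only [List.mem_singleton] at hk
          subst hk
          exact O1 _ hkv
      next h =>
        have hkv : (s :: st').getLast (by simp) ∉ vis :=
          fun hm => h ((PySem.Set.contains_iff vis _).mpr hm)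
        have hfin : (PySem.Set.add vis ((s :: st').getLast (by simp))).toFinset =
            insert ((s :: st').getLast (by simp)) vis.toFinset := by
          rw [PySem.Set.add_of_not_mem hkv]
          simp [List.toFinset_append, Finset.union_singleton]
        have hkeyd : (s :: st').getLast (by simp) ∈ pvU rooms \ vis.toFinset :=
          Finset.mem_sdiff.mpr ⟨hkeyU, fun hc => hkv (List.mem_toFinset.mp hc)⟩
        have hsum : (pvRoom rooms ((s :: st').getLast (by simp))).length +
            ∑ x ∈ (pvU rooms \ vis.toFinset).erase ((s :: st').getLast (by simp)),
              (pvRoom rooms x).length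
            = ∑ x ∈ pvU rooms \ vis.toFinset, (pvRoom rooms x).length :=
          Finset.add_sum_erase _ (fun x => (pvRoom rooms x).length) hkeyd
        have hfuel' : ((s :: st').dropLast ++ pvRoom rooms ((s :: st').getLast (by simp))).length
            + ∑ x ∈ pvU rooms \ (PySem.Set.add vis ((s :: st').getLast (by simp))).toFinset,
                (pvRoom rooms x).length ≤ f := by
          rw [hfin, Finset.sdiff_insert]
          simp only [List.length_append]
          omega
        obtain ⟨O1, O2, O3, O4⟩ := ih
          ((s :: st').dropLast ++ pvRoom rooms ((s :: st').getLast (by simp)))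
          (PySem.Set.add vis ((s :: st').getLast (by simp)))
          (fun k hk => by
            rcases List.mem_append.mp hk with hk | hk
            exacts [hstsub k hk, pvRoom_sub_flatten rooms _ k hk])
          (fun x hx => by
            rcases (PySem.Set.mem_add _ _ _).mp hx with hx | rfl
            exacts [hvU x hx, hkeyU])
          hfuel'
        refine ⟨fun x hx => O1 x ((PySem.Set.mem_add _ _ _).mpr (Or.inl hx)), ?_, O3, ?_⟩
        · intro k hk
          rw [← hdecomp] at hk
          rcases List.mem_append.mp hk with hk | hk
          · exact O2 k (List.mem_append.mpr (Or.inl hk))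
          · simp only [List.mem_singleton] at hk
            subst hk
            exact O1 _ ((PySem.Set.mem_add _ _ _).mpr (Or.inr rfl))
        · intro x hx hxv y hy
          by_cases hxk : x = (s :: st').getLast (by simp)
          · subst hxk
            exact O2 y (List.mem_append.mpr (Or.inr hy))
          · refine O4 x hx ?_ y hy
            intro hm
            rcases (PySem.Set.mem_add _ _ _).mp hm with hm | hm
            exacts [hxv hm, hxk hm]

lemma stackLoop_sound (rooms : List (List Int)) :
    ∀ (f : Nat) (st : List Int) (vis : PySem.Set Int),
      (∀ x ∈ vis, pvReach rooms x) → (∀ k ∈ st, pvReach rooms k) →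
      ∀ x ∈ pvStackLoop rooms f st vis, pvReach rooms x := by
  intro f
  induction f with
  | zero =>
    intro st vis hv hk x hx
    simp only [pvStackLoop] at hx; exact hv x hx
  | succ f ih =>
    intro st vis hv hk x hx
    cases st with
    | nil => simp only [pvStackLoop] at hx; exact hv x hx
    | cons s st' =>
      simp only [pvStackLoop] at hx
      have hkey : pvReach rooms ((s :: st').getLast (by simp)) :=
        hk _ (List.getLast_mem _)
      split at hx
      · exact ih _ vis hv (fun k h => hk k (List.dropLast_subset _ h)) x hx
      · refine ih _ _ ?_ ?_ x hx
        · intro w hw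
          rcases (PySem.Set.mem_add _ _ _).mp hw with hw | rfl
          · exact hv w hw
          · exact hkey
        · intro k h
          rcases List.mem_append.mp h with h | h
          · exact hk k (List.dropLast_subset _ h)
          · exact pvReach.step hkey h

lemma stackLoop_nodup (rooms : List (List Int)) :
    ∀ (f : Nat) (st : List Int) (vis : PySem.Set Int),
      vis.Nodup → (pvStackLoop rooms f st vis).Nodup := by
  intro f
  induction f with
  | zero => intro st vis h; simpa [pvStackLoop]
  | succ f ih =>
    intro st vis h
    cases st with
    | nil => simpa [pvStackLoop]
    | cons s st' =>
      simp only [pvStackLoop]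
      split
      · exact ih _ vis h
      · exact ih _ _ (PySem.Set.nodup_add _ _ h)

lemma memB_iff (rooms : List (List Int)) (x : Int) :
    x ∈ pvStackLoop rooms
        ((rooms.flatten.length + 2) * ((rooms.map List.length).foldr Nat.max 0) + 1)
        (pvRoom rooms 0) (PySem.Set.ofList [0]) ↔ pvReach rooms x := by
  have h0U : (0 : Int) ∈ pvU rooms := Finset.mem_insert_self _ _
  have hmem0 : ∀ w : Int, w ∈ (PySem.Set.ofList [(0 : Int)]) ↔ w = 0 := by
    intro w
    rw [PySem.Set.mem_ofList]
    simp
  have hks : ∀ k ∈ pvRoom rooms 0, k ∈ rooms.flatten :=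
    pvRoom_sub_flatten rooms 0
  have hvU : ∀ w ∈ (PySem.Set.ofList [(0 : Int)]), w ∈ pvU rooms := by
    intro w hw
    rw [(hmem0 w).mp hw]
    exact h0U
  have hlenle : ∀ k : Int, (pvRoom rooms k).length ≤ (rooms.map List.length).foldr Nat.max 0 := by
    intro k
    cases hg : PySem.List.pyGet? rooms k with
    | none => simp [pvRoom, hg]
    | some r =>
      have hr : r ∈ rooms := PySem.List.mem_of_pyGet?_eq_some rooms hg
      have : r.length ∈ rooms.map List.length := List.mem_map_of_mem hr
      simpa [pvRoom, hg] using pvLe_foldr_max this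
  have hfuel : (pvRoom rooms 0).length +
      ∑ x ∈ pvU rooms \ (PySem.Set.ofList [(0 : Int)]).toFinset, (pvRoom rooms x).length ≤
      (rooms.flatten.length + 2) * ((rooms.map List.length).foldr Nat.max 0) + 1 := by
    have hcard : (pvU rooms \ (PySem.Set.ofList [(0 : Int)]).toFinset).card ≤
        rooms.flatten.length + 1 :=
      le_trans (Finset.card_le_card Finset.sdiff_subset) (pvU_card_le rooms)
    have hsum : ∑ x ∈ pvU rooms \ (PySem.Set.ofList [(0 : Int)]).toFinset, (pvRoom rooms x).length ≤
        (pvU rooms \ (PySem.Set.ofList [(0 : Int)]).toFinset).card *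
          ((rooms.map List.length).foldr Nat.max 0) := by
      calc ∑ x ∈ pvU rooms \ (PySem.Set.ofList [(0 : Int)]).toFinset, (pvRoom rooms x).length
          ≤ (pvU rooms \ (PySem.Set.ofList [(0 : Int)]).toFinset).card •
            ((rooms.map List.length).foldr Nat.max 0) :=
            Finset.sum_le_card_nsmul _ _ _ (fun x _ => hlenle x)
        _ = _ := smul_eq_mul _ _
    have h0 := hlenle 0
    have hmul : (pvU rooms \ (PySem.Set.ofList [(0 : Int)]).toFinset).card *
        ((rooms.map List.length).foldr Nat.max 0) ≤
        (rooms.flatten.length + 1) * ((rooms.map List.length).foldr Nat.max 0) :=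
      Nat.mul_le_mul_right _ hcard
    have hdist : (rooms.flatten.length + 2) * ((rooms.map List.length).foldr Nat.max 0) =
        (rooms.flatten.length + 1) * ((rooms.map List.length).foldr Nat.max 0) +
          ((rooms.map List.length).foldr Nat.max 0) := by ring
    omega
  obtain ⟨M1, M2, M3, M4⟩ := stackLoop_main rooms
    ((rooms.flatten.length + 2) * ((rooms.map List.length).foldr Nat.max 0) + 1)
    (pvRoom rooms 0) (PySem.Set.ofList [0]) hks hvU hfuel
  constructor
  · intro hx
    refine stackLoop_sound rooms _ _ _ ?_ (fun k hk => pvReach.step pvReach.zero hk) x hx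
    intro w hw
    rw [(hmem0 w).mp hw]
    exact pvReach.zero
  · intro hr
    induction hr with
    | zero => exact M1 0 ((hmem0 0).mpr rfl)
    | @step a b h1 h2 ih =>
      by_cases ha : a = 0
      · subst ha
        exact M2 _ h2
      · exact M4 a ih (fun hm => ha ((hmem0 a).mp hm)) b h2

-- ===== VERDICT (by name: the statement is the Claim_ definition above) =====
theorem canVisitAll_spec : Claim_equal_canVisitAll := by
  intro rooms _hdom _hpre
  unfold Spec_canVisitAll canVisitAll canVisitAll_alt
  have hA := enterroom_nodup rooms (rooms.flatten.length + 1) (pvRoom rooms 0)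
      (PySem.Set.ofList [0]) (by decide)
  have hB := stackLoop_nodup rooms
      ((rooms.flatten.length + 2) * ((rooms.map List.length).foldr Nat.max 0) + 1)
      (pvRoom rooms 0) (PySem.Set.ofList [0]) (by decide)
  have hperm : (enterroom rooms (rooms.flatten.length + 1) (pvRoom rooms 0)
        (PySem.Set.ofList [0])).Perm
      (pvStackLoop rooms
        ((rooms.flatten.length + 2) * ((rooms.map List.length).foldr Nat.max 0) + 1)
        (pvRoom rooms 0) (PySem.Set.ofList [0])) := by
    refine (List.perm_ext_iff_of_nodup hA hB).mpr ?_
    intro x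
    rw [memA_iff rooms x, memB_iff rooms x]
  simp only [hperm.length_eq]
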